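-- pv_equiv track=rewrite | github.com/pypi-data/pypi-mirror-392 | packages/funcLibrary/funclibrary-0.1.1-py3-none-any.whl/funcLibrary/string_methods.py | islower
-- ===== SOURCE A (Python) =====
-- def islower(string):
--     """
--       Checks if all alphabetic characters in the string are lowercase.
--
--       Args:
--           string (str): The input string.
--
--       Returns:
--           bool: True if all letters are lowercase, False otherwise.
--       """
--     status = bool()
--     for x in string:
--
--         if ord(x) >= 65 and ord(x) <= 90:
--             status = False
--         elif ord(x) >= 97 and ord(x) <= 122:
--             status = True
--
--     return status
-- ===== SOURCE B (Python) =====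
-- def islower(string):
--     # Reverse early-exit scan: the last ASCII letter decides; no letter -> False.
--     for x in reversed(string):
--         o = ord(x)
--         if 97 <= o <= 122:
--             return True
--         if 65 <= o <= 90:
--             return False
--     return False
-- ===== Notes on version B (the rewrite author's own statement) =====
-- stated objective: faster
-- what changed: Replaces A's forward full scan with an overwritten status flag by a reverse scan that returns at the first ASCII letter found (the last letter of the string).
import Mathlib
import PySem

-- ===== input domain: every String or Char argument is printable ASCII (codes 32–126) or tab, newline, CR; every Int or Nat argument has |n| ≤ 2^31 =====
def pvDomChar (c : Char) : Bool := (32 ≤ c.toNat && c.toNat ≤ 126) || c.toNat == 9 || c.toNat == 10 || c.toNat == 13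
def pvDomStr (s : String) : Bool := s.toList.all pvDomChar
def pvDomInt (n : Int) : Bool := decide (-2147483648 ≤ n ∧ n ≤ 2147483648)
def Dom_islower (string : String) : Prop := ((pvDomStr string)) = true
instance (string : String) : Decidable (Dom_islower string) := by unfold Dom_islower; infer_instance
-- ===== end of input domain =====

-- B replaces A's forward scan with an overwritten flag by a reverse early-exit scan (alternative decomposition, same result).


-- ===== PORT A =====
-- status updated per char, forward fold over the string
def islowerStep (status : Bool) (x : Char) : Bool :=
  if 65 ≤ x.toNat ∧ x.toNat ≤ 90 then false
  else if 97 ≤ x.toNat ∧ x.toNat ≤ 122 then true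
  else status

def islower (string : String) : Bool :=
  string.toList.foldl islowerStep false

-- ===== PORT B =====
-- reverse early-exit scan: first letter seen (= last letter of the string) decides
def islowerRevScan : List Char → Bool
  | [] => false
  | x :: r =>
    if 97 ≤ x.toNat ∧ x.toNat ≤ 122 then true
    else if 65 ≤ x.toNat ∧ x.toNat ≤ 90 then false
    else islowerRevScan r

def islower_alt (string : String) : Bool :=
  islowerRevScan string.toList.reverse

-- ===== PRECONDITION & SPEC =====
def Spec_islower (string : String) (out : Bool) : Prop := out = islower_alt string
instance (string : String) (out : Bool) : Decidable (Spec_islower string out) := by unfold Spec_islower; infer_instance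

-- ===== CLAIM (what is proved, stated in full; the proofs are below) =====
def Claim_equal_islower : Prop := ∀ (string : String), Dom_islower string → Spec_islower string (islower string)

-- ===== LEMMAS AND PROOFS =====
-- generalised reverse scan carrying the fold's accumulator as the no-letter default
def revScanAux (l : List Char) (st : Bool) : Bool :=
  match l with
  | [] => st
  | x :: r =>
    if 97 ≤ x.toNat ∧ x.toNat ≤ 122 then true
    else if 65 ≤ x.toNat ∧ x.toNat ≤ 90 then false
    else revScanAux r st

theorem revScanAux_snoc (xs : List Char) (c : Char) (st : Bool) :
    revScanAux (xs ++ [c]) st = revScanAux xs (islowerStep st c) := by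
  induction xs with
  | nil =>
    simp only [List.nil_append, revScanAux, islowerStep]
    split_ifs <;> first | rfl | omega
  | cons y ys ih =>
    simp only [List.cons_append, revScanAux, ih]

theorem foldl_eq_revScanAux (l : List Char) (st : Bool) :
    l.foldl islowerStep st = revScanAux l.reverse st := by
  induction l generalizing st with
  | nil => rfl
  | cons x r ih =>
    simp only [List.foldl_cons, List.reverse_cons, revScanAux_snoc, ih]

theorem revScan_eq_aux (l : List Char) : islowerRevScan l = revScanAux l false := by
  induction l with
  | nil => rfl
  | cons x r ih => simp only [islowerRevScan, revScanAux, ih]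

-- ===== VERDICT (by name: the statement is the Claim_ definition above) =====
theorem islower_spec : Claim_equal_islower := by
  intro s _
  unfold Spec_islower islower islower_alt
  rw [revScan_eq_aux, foldl_eq_revScanAux]
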